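-- pv_equiv track=rewrite | github.com/akekesi/CoMa | PA_12.py | maxunimod
-- ===== SOURCE A (Python) =====
-- def maxunimod(M):
--     S = ['<']                       # Hilfsliste fuer '<','=','>'
--     for i in range(1,len(M)):
--         if M[i-1] < M[i]:
--             S.append('<')
--         elif M[i-1] > M[i]:
--             S.append('>')
--         else:
--             S.append('=')
--     if len(M) == 0:
--         return 0
--     elif len(M) == 1:
--         return 1
--     else:
--         s = 0                       # Laenge der unimodularen Liste
--     TMP = S[:]                      # originale S behalten, da '=' in S bei jeder Schleife umschrieben wird
--     for i in range(len(M)):         # check die Laenge der unimodularen Liste von vorne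
--         S = TMP[:]                  # originale S
--         S[i] = '<'                  # erste Element soll immer '<' sein
--         tmp = 1
--         for j in range(i+1,len(M)):
--             if S[j] == '=':         # '='
--                 tmp += 1
--                 S[j] = S[j-1]
--             elif S[j-1] == '<':     # vorherige: '<'
--                 if S[j] == '<':
--                     tmp += 1
--                 else:
--                     tmp += 1
--             elif S[j-1] == '>':     # vorherige: '>'
--                 if S[j] == '>':
--                     tmp += 1
--                 else:               # Ender der unimodularen Liste
--                     if s < tmp:
--                         s = tmp
--                     break
--             if j == len(M)-1:       # if es Ende der Liste erreicht
--                 if s < tmp: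
--                     s = tmp
--     return s
-- ===== SOURCE B (Python) =====
-- def maxunimod(M):
--     # One right-to-left pass: for each suffix track the length of the longest
--     # non-increasing run starting there (down) and of the longest unimodal
--     # (non-decreasing then non-increasing) run starting there (uni).
--     n = len(M)
--     if n == 0:
--         return 0
--     best = 1
--     down = 1
--     uni = 1
--     for i in range(n - 2, -1, -1):
--         if M[i] > M[i + 1]:
--             down += 1
--             uni = down
--         elif M[i] == M[i + 1]:
--             down += 1
--             uni += 1
--         else:
--             down = 1
--             uni += 1
--         if uni > best:
--             best = uni
--     return best
-- ===== Notes on version B (the rewrite author's own statement) =====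
-- stated objective: faster
-- what changed: Replaced A's quadratic per-start rescans over a mutable comparison-symbol list by a single right-to-left pass maintaining the longest non-increasing and longest unimodal run lengths starting at each position.
import Mathlib
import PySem

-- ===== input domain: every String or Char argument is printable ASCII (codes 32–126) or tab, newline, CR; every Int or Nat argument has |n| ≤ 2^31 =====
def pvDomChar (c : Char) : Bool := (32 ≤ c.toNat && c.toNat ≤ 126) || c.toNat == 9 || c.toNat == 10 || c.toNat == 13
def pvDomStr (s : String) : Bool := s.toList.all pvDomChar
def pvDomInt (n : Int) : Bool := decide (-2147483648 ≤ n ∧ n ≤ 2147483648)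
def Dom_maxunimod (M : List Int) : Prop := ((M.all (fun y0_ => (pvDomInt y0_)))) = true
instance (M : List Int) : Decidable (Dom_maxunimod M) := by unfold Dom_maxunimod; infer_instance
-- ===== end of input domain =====

-- B replaces A's O(n^2) per-start rescans of a comparison-symbol list by one O(n) right-to-left
-- pass maintaining longest non-increasing / longest unimodal run lengths (objective: faster).

-- ===== PORT A =====
-- comparison symbol between two adjacent elements ('<' / '>' / '=')
def cmpc (a b : Int) : Char := if a < b then '<' else if a > b then '>' else '='

-- S = ['<'] ; for i in range(1, len(M)): S.append(...)
def buildS (M : List Int) : List Char :=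
  (List.range' 1 (M.length - 1)).foldl
    (fun S i => S ++ [cmpc (M.getD (i - 1) 0) (M.getD i 0)]) ['<']

-- the inner 'for j in range(i+1, len(M))' loop with its break; all index accesses are in
-- range in every call the program makes, so getD with a dummy default is exact here
def innerA (S : List Char) (n j : Nat) (tmp s : Int) : Int :=
  if j < n then
    if S.getD j ' ' = '=' then
      innerA (S.set j (S.getD (j - 1) ' ')) n (j + 1) (tmp + 1)
        (if j = n - 1 then (if s < tmp + 1 then tmp + 1 else s) else s)
    else if S.getD (j - 1) ' ' = '<' then
      innerA S n (j + 1) (tmp + 1)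
        (if j = n - 1 then (if s < tmp + 1 then tmp + 1 else s) else s)
    else if S.getD (j - 1) ' ' = '>' then
      if S.getD j ' ' = '>' then
        innerA S n (j + 1) (tmp + 1)
          (if j = n - 1 then (if s < tmp + 1 then tmp + 1 else s) else s)
      else if s < tmp then tmp else s         -- break (after updating s)
    else
      innerA S n (j + 1) tmp (if j = n - 1 then (if s < tmp then tmp else s) else s)
  else s
termination_by n - j

-- the outer 'for i in range(len(M))' loop: S = TMP[:], S[i] = '<', tmp = 1, inner loop
def outerA (M : List Int) (TMP : List Char) (i : Nat) (s : Int) : Int :=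
  if i < M.length then
    outerA M TMP (i + 1) (innerA (TMP.set i '<') M.length (i + 1) 1 s)
  else s
termination_by M.length - i

def maxunimod (M : List Int) : Int :=
  let S := buildS M
  if M.length = 0 then 0
  else if M.length = 1 then 1
  else outerA M S 0 0

-- ===== PORT B =====
-- right-to-left pass (the Python 'for i in range(n-2, -1, -1)' loop as structural recursion):
-- returns (down, uni, best) for the suffix starting at the given head element
def bAux (x : Int) : List Int → Int × Int × Int
  | [] => (1, 1, 1)
  | y :: ys =>
    let r := bAux y ys
    let du : Int × Int :=
      if x > y then (r.1 + 1, r.1 + 1)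
      else if x = y then (r.1 + 1, r.2.1 + 1)
      else (1, r.2.1 + 1)
    (du.1, du.2, if du.2 > r.2.2 then du.2 else r.2.2)

def maxunimod_alt : List Int → Int
  | [] => 0
  | x :: xs => (bAux x xs).2.2

-- ===== PRECONDITION & SPEC =====
def Spec_maxunimod (M : List Int) (out : Int) : Prop := out = maxunimod_alt M
instance (M : List Int) (out : Int) : Decidable (Spec_maxunimod M out) := by unfold Spec_maxunimod; infer_instance

-- ===== CLAIM (what is proved, stated in full; the proofs are below) =====
def Claim_equal_maxunimod : Prop := ∀ (M : List Int), Dom_maxunimod M → Spec_maxunimod M (maxunimod M)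

-- ===== LEMMAS AND PROOFS =====

-- the comparison chain of a list: chain [m0,m1,...] = [cmpc m0 m1, cmpc m1 m2, ...]
def chain : List Int → List Char
  | [] => []
  | [_] => []
  | x :: y :: t => cmpc x y :: chain (y :: t)

-- abstract model of one run of the inner loop, carrying the (rewritten) previous symbol p
def absInner (p : Char) (v : Int) (ws : List Int) (tmp s : Int) : Int :=
  match ws with
  | [] => s
  | w :: ws' =>
    if v = w then
      absInner p w ws' (tmp + 1)
        (if ws' = [] then (if s < tmp + 1 then tmp + 1 else s) else s)
    else if p = '<' then
      absInner (cmpc v w) w ws' (tmp + 1)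
        (if ws' = [] then (if s < tmp + 1 then tmp + 1 else s) else s)
    else if p = '>' then
      (if v > w then
        absInner '>' w ws' (tmp + 1)
          (if ws' = [] then (if s < tmp + 1 then tmp + 1 else s) else s)
      else if s < tmp then tmp else s)
    else
      absInner (cmpc v w) w ws' tmp
        (if ws' = [] then (if s < tmp then tmp else s) else s)

-- number of inner-loop steps taken before the scan stops
def scanLen (p : Char) (v : Int) : List Int → Int
  | [] => 0
  | w :: ws =>
    if v = w then 1 + scanLen p w ws
    else if p = '<' then 1 + scanLen (cmpc v w) w ws
    else if v > w then 1 + scanLen '>' w ws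
    else 0

theorem getD_mid (pre : List Char) (c : Char) (rest : List Char) :
    (pre ++ c :: rest).getD pre.length ' ' = c := by
  induction pre with
  | nil => rfl
  | cons a l ih => simpa using ih

theorem getD_mid1 (pre : List Char) (c d : Char) (rest : List Char) :
    (pre ++ c :: d :: rest).getD (pre.length + 1) ' ' = d := by
  induction pre with
  | nil => rfl
  | cons a l ih => simpa using ih

theorem set_mid1 (pre : List Char) (c d e : Char) (rest : List Char) :
    (pre ++ c :: d :: rest).set (pre.length + 1) e = pre ++ c :: e :: rest := by
  induction pre with
  | nil => rfl
  | cons a l ih => simpa using ih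

theorem inner_eq_abs : ∀ (ws : List Int) (pre : List Char) (p : Char) (v : Int) (tmp s : Int),
    innerA (pre ++ p :: chain (v :: ws)) (pre.length + 1 + ws.length) (pre.length + 1) tmp s
      = absInner p v ws tmp s := by
  intro ws
  induction ws with
  | nil =>
    intro pre p v tmp s
    rw [innerA]
    rw [if_neg (by simp : ¬ pre.length + 1 < pre.length + 1 + ([] : List Int).length)]
    rfl
  | cons w ws' ih =>
    intro pre p v tmp s
    have hx : chain (v :: w :: ws') = cmpc v w :: chain (w :: ws') := rfl
    rw [hx, innerA]
    simp only [List.length_cons]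
    rw [if_pos (by omega : pre.length + 1 < pre.length + 1 + (ws'.length + 1))]
    have hsub : pre.length + 1 - 1 = pre.length := by omega
    rw [hsub, getD_mid1, getD_mid]
    have hiff : (pre.length + 1 = pre.length + 1 + (ws'.length + 1) - 1) = (ws' = []) := by
      apply propext
      constructor
      · intro h
        cases ws' with
        | nil => rfl
        | cons a b => exfalso; simp only [List.length_cons] at h; omega
      · intro h; subst h; simp
    simp only [hiff]
    have step : ∀ (c : Char) (t1 s1 : Int),
        innerA (pre ++ p :: c :: chain (w :: ws')) (pre.length + 1 + (ws'.length + 1))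
            (pre.length + 1 + 1) t1 s1
          = absInner c w ws' t1 s1 := by
      intro c t1 s1
      have h1 := ih (pre ++ [p]) c w t1 s1
      rw [List.append_cons pre p (c :: chain (w :: ws'))]
      have e1 : (pre ++ [p]).length = pre.length + 1 := by simp
      rw [e1] at h1
      have e2 : pre.length + 1 + (ws'.length + 1) = pre.length + 1 + 1 + ws'.length := by omega
      rw [e2]
      exact h1
    rcases lt_trichotomy v w with h | h | h
    · have hc : cmpc v w = '<' := by simp only [cmpc, if_pos h]
      rw [hc]
      show _ = absInner p v (w :: ws') tmp s
      rw [absInner]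
      rw [if_neg (by decide : ¬ ('<' : Char) = '='), if_neg (by omega : ¬ v = w),
        if_neg (by decide : ¬ ('<' : Char) = '>'), if_neg (by omega : ¬ v > w), hc]
      split_ifs <;> first | rfl | exact step '<' _ _
    · subst h
      have hc : cmpc v v = '=' := by simp [cmpc]
      rw [hc]
      show _ = absInner p v (v :: ws') tmp s
      rw [absInner]
      rw [if_pos (rfl : ('=' : Char) = '='), if_pos (rfl : v = v), set_mid1]
      exact step p _ _
    · have hc : cmpc v w = '>' := by
        simp only [cmpc, if_neg (by omega : ¬ v < w), if_pos (by omega : v > w)]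
      rw [hc]
      show _ = absInner p v (w :: ws') tmp s
      rw [absInner]
      rw [if_neg (by decide : ¬ ('>' : Char) = '='), if_neg (by omega : ¬ v = w),
        if_pos (rfl : ('>' : Char) = '>'), if_pos (by omega : v > w), hc]
      split_ifs <;> first | rfl | exact step '>' _ _

theorem abs_result : ∀ (ws : List Int) (p : Char) (v : Int) (tmp s : Int),
    p = '<' ∨ p = '>' →
    absInner p v ws tmp s
      = if ws = [] then s
        else (if s < tmp + scanLen p v ws then tmp + scanLen p v ws else s) := by
  intro ws
  induction ws with
  | nil => intro p v tmp s _; simp [absInner]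
  | cons w ws' ih =>
    intro p v tmp s hp
    have hne : ¬ ((w :: ws' : List Int) = []) := by simp
    have key : ∀ p', p' = '<' ∨ p' = '>' →
        absInner p' w ws' (tmp + 1)
            (if ws' = [] then (if s < tmp + 1 then tmp + 1 else s) else s)
          = if s < tmp + (1 + scanLen p' w ws') then tmp + (1 + scanLen p' w ws') else s := by
      intro p' hp'
      rw [ih p' w (tmp + 1) _ hp']
      rcases eq_or_ne ws' [] with rfl | h
      · simp [scanLen] <;> (split_ifs <;> omega)
      · simp only [if_neg h]
        split_ifs <;> omega
    rcases hp with rfl | rfl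
    · rcases lt_trichotomy v w with h | h | h
      · have hvw : v ≠ w := by omega
        have hc : cmpc v w = '<' := by simp [cmpc, h]
        simp only [absInner, if_neg hvw, if_pos (rfl : ('<' : Char) = '<'), hc, if_true, ite_true]
        rw [key '<' (Or.inl rfl)]
        have hs : scanLen '<' v (w :: ws') = 1 + scanLen '<' w ws' := by
          simp [scanLen, hvw, hc]
        rw [if_neg hne, hs]
      · subst h
        simp only [absInner, if_pos (rfl : v = v), if_true, ite_true]
        rw [key '<' (Or.inl rfl)]
        have hs : scanLen '<' v (v :: ws') = 1 + scanLen '<' v ws' := by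
          simp [scanLen]
        rw [if_neg hne, hs]
      · have hvw : v ≠ w := by omega
        have hc : cmpc v w = '>' := by
          simp only [cmpc, if_neg (by omega : ¬ v < w), if_pos (by omega : v > w)]
        simp only [absInner, if_neg hvw, if_pos (rfl : ('<' : Char) = '<'), hc, if_true, ite_true]
        rw [key '>' (Or.inr rfl)]
        have hs : scanLen '<' v (w :: ws') = 1 + scanLen '>' w ws' := by
          simp [scanLen, hvw, hc]
        rw [if_neg hne, hs]
    · rcases lt_trichotomy v w with h | h | h
      · have hvw : v ≠ w := by omega
        have hgt : ¬ v > w := by omega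
        simp only [absInner, if_neg hvw, if_neg (by decide : ¬ ('>' : Char) = '<'),
          if_pos (rfl : ('>' : Char) = '>'), if_neg hgt, if_true, ite_true, if_false, ite_false]
        have hs : scanLen '>' v (w :: ws') = 0 := by
          simp [scanLen, hvw, hgt, (by decide : ¬ ('>' : Char) = '<')]
        rw [if_neg hne, hs]
        split_ifs <;> omega
      · subst h
        simp only [absInner, if_pos (rfl : v = v), if_true, ite_true]
        rw [key '>' (Or.inr rfl)]
        have hs : scanLen '>' v (v :: ws') = 1 + scanLen '>' v ws' := by
          simp [scanLen]
        rw [if_neg hne, hs]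
      · have hvw : v ≠ w := by omega
        simp only [absInner, if_neg hvw, if_neg (by decide : ¬ ('>' : Char) = '<'),
          if_pos (rfl : ('>' : Char) = '>'), if_pos h, if_true, ite_true, if_false, ite_false]
        rw [key '>' (Or.inr rfl)]
        have hs : scanLen '>' v (w :: ws') = 1 + scanLen '>' w ws' := by
          simp [scanLen, hvw, h, (by decide : ¬ ('>' : Char) = '<')]
        rw [if_neg hne, hs]

theorem scan_bAux : ∀ (ws : List Int) (v : Int),
    scanLen '>' v ws + 1 = (bAux v ws).1 ∧ scanLen '<' v ws + 1 = (bAux v ws).2.1 := by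
  intro ws
  induction ws with
  | nil => intro v; simp [scanLen, bAux]
  | cons w ws' ih =>
    intro v
    obtain ⟨hd, hu⟩ := ih w
    rcases lt_trichotomy v w with h | h | h
    · have h1 : v ≠ w := by omega
      have h2 : ¬ v > w := by omega
      simp [scanLen, bAux, cmpc, h, h1, h2]
      omega
    · subst h
      simp [scanLen, bAux]
      omega
    · have h1 : v ≠ w := by omega
      have h2 : ¬ v < w := by omega
      simp [scanLen, bAux, cmpc, h, h1, h2]
      omega

theorem bAux_pos : ∀ (xs : List Int) (x : Int),
    1 ≤ (bAux x xs).1 ∧ 1 ≤ (bAux x xs).2.1 ∧ 1 ≤ (bAux x xs).2.2 := by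
  intro xs
  induction xs with
  | nil => intro x; simp [bAux]
  | cons y ys ih =>
    intro x
    obtain ⟨h1, h2, h3⟩ := ih y
    simp only [bAux]
    split_ifs <;> refine ⟨by omega, by omega, by omega⟩

theorem foldl_app_singleton {α β : Type} (f : α → β) :
    ∀ (xs : List α) (init : List β),
      xs.foldl (fun S i => S ++ [f i]) init = init ++ xs.map f := by
  intro xs
  induction xs with
  | nil => simp
  | cons a l ih => intro init; simp [ih]

theorem map_chain : ∀ (t : List Int) (x : Int),
    (List.range' 1 t.length).map
        (fun i => cmpc ((x :: t).getD (i - 1) 0) ((x :: t).getD i 0))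
      = chain (x :: t) := by
  intro t
  induction t with
  | nil => intro x; simp [chain]
  | cons y t' ih =>
    intro x
    rw [List.length_cons, List.range'_succ, List.map_cons]
    have hhead : cmpc ((x :: y :: t').getD (1 - 1) 0) ((x :: y :: t').getD 1 0) = cmpc x y := by
      simp
    rw [hhead]
    show _ = chain (x :: y :: t')
    rw [chain]
    congr 1
    have hsh : List.range' 2 t'.length = (List.range' 1 t'.length).map (1 + ·) := by
      rw [List.map_add_range']
    rw [hsh, List.map_map, ← ih y]
    apply List.map_congr_left
    intro a ha
    have h1 : 1 ≤ a := (List.mem_range'_1.mp ha).1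
    obtain ⟨k, rfl⟩ : ∃ k, a = k + 1 := ⟨a - 1, by omega⟩
    have e1 : 1 + (k + 1) - 1 = k + 1 := by omega
    have e2 : 1 + (k + 1) = k + 2 := by omega
    simp [Function.comp, e1, e2]

theorem buildS_eq (x : Int) (t : List Int) : buildS (x :: t) = '<' :: chain (x :: t) := by
  unfold buildS
  rw [foldl_app_singleton]
  simp only [List.length_cons, Nat.add_sub_cancel]
  rw [map_chain]
  rfl

theorem chain_length : ∀ (M : List Int), (chain M).length = M.length - 1 := by
  intro M
  induction M with
  | nil => rfl
  | cons x t ih =>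
    cases t with
    | nil => rfl
    | cons y t' => simp [chain] at ih ⊢; omega

theorem chain_drop : ∀ (i : Nat) (M : List Int), (chain M).drop i = chain (M.drop i) := by
  intro i
  induction i with
  | zero => simp
  | succ k ih =>
    intro M
    match M with
    | [] => simp [chain]
    | [x] => simp [chain]
    | x :: y :: t => simpa [chain] using ih (y :: t)

theorem bAux_best (x y : Int) (ys : List Int) :
    (bAux x (y :: ys)).2.2
      = if (bAux x (y :: ys)).2.1 > (bAux y ys).2.2 then (bAux x (y :: ys)).2.1
        else (bAux y ys).2.2 := by
  simp only [bAux]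

theorem outer_eq : ∀ (ws : List Int) (M : List Int) (i : Nat) (x : Int) (s : Int),
    M.drop i = x :: ws → i + 1 + ws.length = M.length →
    outerA M ('<' :: chain M) i s
      = match ws with
        | [] => s
        | _ :: _ => max s ((bAux x ws).2.2) := by
  intro ws
  induction ws with
  | nil =>
    intro M i x s hdrop hlen
    have hi : i < M.length := by simp at hlen; omega
    have hclen : ('<' :: chain M).length = M.length := by
      simp [chain_length]; omega
    have hset : ('<' :: chain M).set i '<'
        = (('<' :: chain M).take i) ++ '<' :: chain [x] := by
      rw [List.set_eq_take_cons_drop _ (by omega : i < ('<' :: chain M).length)]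
      congr 1
      rw [List.drop_succ_cons, chain_drop, hdrop]
    have htake : (('<' :: chain M).take i).length = i := by
      rw [List.length_take]; omega
    have h1 := inner_eq_abs [] (('<' :: chain M).take i) '<' x 1 s
    rw [htake, hlen] at h1
    rw [outerA, if_pos hi, hset, h1]
    show outerA M ('<' :: chain M) (i + 1) s = s
    rw [outerA, if_neg (by simp at hlen; omega)]
  | cons w ws'' ih =>
    intro M i x s hdrop hlen
    have hi : i < M.length := by simp at hlen; omega
    have hclen : ('<' :: chain M).length = M.length := by
      simp [chain_length]; omega
    have hset : ('<' :: chain M).set i '<'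
        = (('<' :: chain M).take i) ++ '<' :: chain (x :: w :: ws'') := by
      rw [List.set_eq_take_cons_drop _ (by omega : i < ('<' :: chain M).length)]
      congr 1
      rw [List.drop_succ_cons, chain_drop, hdrop]
    have htake : (('<' :: chain M).take i).length = i := by
      rw [List.length_take]; omega
    have h1 := inner_eq_abs (w :: ws'') (('<' :: chain M).take i) '<' x 1 s
    rw [htake, hlen] at h1
    rw [outerA, if_pos hi, hset, h1]
    rw [abs_result (w :: ws'') '<' x 1 s (Or.inl rfl),
      if_neg (by simp : ¬ (w :: ws'' : List Int) = [])]
    have hdrop' : M.drop (i + 1) = w :: ws'' := by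
      have h2 : M.drop (i + 1) = (M.drop i).drop 1 := by rw [List.drop_drop]
      rw [h2, hdrop]
      rfl
    have hlen' : (i + 1) + 1 + ws''.length = M.length := by simp at hlen; omega
    rw [ih M (i + 1) w _ hdrop' hlen']
    cases ws'' with
    | nil =>
      have hU := (scan_bAux [w] x).2
      have hb := bAux_best x w []
      obtain ⟨_, hp2, _⟩ := bAux_pos [w] x
      have e1 : (bAux w []).2.2 = 1 := rfl
      show (if s < 1 + scanLen '<' x [w] then 1 + scanLen '<' x [w] else s)
            = max s ((bAux x [w]).2.2)
      rw [hb, e1]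
      split_ifs <;> omega
    | cons w' t =>
      have hU := (scan_bAux (w :: w' :: t) x).2
      have hb := bAux_best x w (w' :: t)
      obtain ⟨_, hp2, _⟩ := bAux_pos (w :: w' :: t) x
      obtain ⟨_, _, hq3⟩ := bAux_pos (w' :: t) w
      show max (if s < 1 + scanLen '<' x (w :: w' :: t) then 1 + scanLen '<' x (w :: w' :: t) else s)
            ((bAux w (w' :: t)).2.2)
          = max s ((bAux x (w :: w' :: t)).2.2)
      rw [hb]
      split_ifs <;> omega

-- ===== VERDICT (by name: the statement is the Claim_ definition above) =====
theorem maxunimod_spec : Claim_equal_maxunimod := by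
  unfold Claim_equal_maxunimod Spec_maxunimod
  intro M _
  match M with
  | [] => rfl
  | [x] => rfl
  | x :: w :: t =>
    show maxunimod (x :: w :: t) = maxunimod_alt (x :: w :: t)
    unfold maxunimod
    rw [buildS_eq]
    simp only [List.length_cons]
    rw [if_neg (by omega), if_neg (by omega)]
    rw [outer_eq (w :: t) (x :: w :: t) 0 x 0 (by rfl) (by simp only [List.length_cons]; omega)]
    show max 0 ((bAux x (w :: t)).2.2) = (bAux x (w :: t)).2.2
    obtain ⟨_, _, h3⟩ := bAux_pos (w :: t) x
    omega
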